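-- pv_equiv track=rewrite | github.com/16yo/DM | rgr/rgr_2/perm_long.py | make_perm
-- ===== SOURCE A (Python) =====
-- N = 8
--
-- def make_perm(s: str):
--     m = dict({})
--
--     for i in range(1, N + 1):
--         c = str(i)
--         j = s.find(c)
--         if j != -1:
--             if j < len(s) - 1:
--                 m.update({ c : s[s.find(c) + 1]})
--             else:
--                 m.update({ c : s[0] })
--         else:
--             m.update({ c : c })
--     return m
-- ===== SOURCE B (Python) =====
-- N = 8
--
-- def make_perm(s: str):
--     digits = [str(i) for i in range(1, N + 1)]
--     m = {c: c for c in digits}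
--     seen = set()
--     for idx, ch in enumerate(s):
--         if ch in m and ch not in seen:
--             seen.add(ch)
--             m[ch] = s[idx + 1] if idx < len(s) - 1 else s[0]
--     return m
-- ===== Notes on version B (the rewrite author's own statement) =====
-- stated objective: alternative
-- what changed: A scans the string once per digit with s.find (8 scans plus a repeated find in the hit branch); B makes one left-to-right pass over enumerate(s) with a first-occurrence seen set, updating an identity-initialized dict.
import Mathlib
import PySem

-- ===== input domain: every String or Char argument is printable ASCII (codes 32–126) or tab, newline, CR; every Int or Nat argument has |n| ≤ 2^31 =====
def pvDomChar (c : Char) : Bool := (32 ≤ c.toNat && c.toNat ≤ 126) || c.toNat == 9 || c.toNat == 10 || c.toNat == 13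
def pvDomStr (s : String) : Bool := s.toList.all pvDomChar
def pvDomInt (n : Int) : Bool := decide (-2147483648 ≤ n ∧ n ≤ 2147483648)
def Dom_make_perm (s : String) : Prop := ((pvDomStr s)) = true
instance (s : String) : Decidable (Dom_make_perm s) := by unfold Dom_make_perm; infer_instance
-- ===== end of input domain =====

-- B replaces A's eight per-digit s.find scans by one left-to-right pass over s with a
-- first-occurrence "seen" set (objective: alternative single-pass algorithm).

-- ===== PORT A =====
-- Literal port of A: for i in 1..8, look up the first occurrence of str(i) with find.
-- The indexings s[find(c)+1] and s[0] are always in range on the branches that use them,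
-- so the .getD "" defaults are never hit.
def make_perm (s : String) : List (String × String) :=
  ((PySem.List.pyRange 1 (8 + 1) 1).foldl (fun m i =>
      let c := PySem.Int.toStr i
      let j := PySem.Str.find s c
      if j ≠ -1 then
        if j < PySem.Str.len s - 1 then
          m.insert c (((PySem.Str.pyGet? s (PySem.Str.find s c + 1)).map (fun ch => String.singleton ch)).getD "")
        else
          m.insert c (((PySem.Str.pyGet? s 0).map (fun ch => String.singleton ch)).getD "")
      else
        m.insert c c)
    PySem.Dict.empty).items

-- ===== PORT B =====
-- Literal port of Source B: identity dict for "1".."8", then one pass over enumerate(s)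
-- recording the first occurrence of each digit.  The indexings s[idx+1] / s[0] are in
-- range on their branches, so the .getD "" defaults are never hit.
def make_perm_alt (s : String) : List (String × String) :=
  let digits := (PySem.List.pyRange 1 (8 + 1) 1).map PySem.Int.toStr
  let m0 : PySem.Dict String String := digits.foldl (fun d c => d.insert c c) PySem.Dict.empty
  let res := (PySem.List.enumerate s.toList).foldl
    (fun (st : PySem.Dict String String × PySem.Set String) p =>
      let ch := String.singleton p.2
      if st.1.contains ch && !(PySem.Set.contains st.2 ch) then
        (st.1.insert ch (if p.1 < PySem.Str.len s - 1
            then ((PySem.Str.pyGet? s (p.1 + 1)).map (fun c => String.singleton c)).getD ""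
            else ((PySem.Str.pyGet? s 0).map (fun c => String.singleton c)).getD ""),
         PySem.Set.add st.2 ch)
      else st)
    (m0, PySem.Set.empty)
  res.1.items

-- ===== PRECONDITION & SPEC =====
def Spec_make_perm (s : String) (out : List (String × String)) : Prop := out = make_perm_alt s
instance (s : String) (out : List (String × String)) : Decidable (Spec_make_perm s out) := by unfold Spec_make_perm; infer_instance

-- ===== CLAIM (what is proved, stated in full; the proofs are below) =====
def Claim_equal_make_perm : Prop := ∀ (s : String), Dom_make_perm s → Spec_make_perm s (make_perm s)

-- ===== LEMMAS AND PROOFS =====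

def digitChars : List Char := ['1', '2', '3', '4', '5', '6', '7', '8']

-- the value A stores for key c (c a one-char digit string)
def vA (s : String) (c : String) : String :=
  if PySem.Str.find s c ≠ -1 then
    if PySem.Str.find s c < PySem.Str.len s - 1 then
      ((PySem.Str.pyGet? s (PySem.Str.find s c + 1)).map (fun ch => String.singleton ch)).getD ""
    else
      ((PySem.Str.pyGet? s 0).map (fun ch => String.singleton ch)).getD ""
  else c

-- (everything below the claim block: proof helpers and lemmas)

theorem singleton_toList (c : Char) : (String.singleton c).toList = [c] := by simp

theorem singleton_beq (a b : Char) :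
    (String.singleton a == String.singleton b) = (a == b) := by
  simp [String.singleton, String.ext_iff]

theorem singleton_inj {a b : Char} (h : String.singleton a = String.singleton b) : a = b := by
  have := congrArg String.toList h
  simpa [singleton_toList] using this

theorem infix_singleton_mem {c : Char} {l : List Char} : [c] <:+: l ↔ c ∈ l := by
  constructor
  · intro h; exact List.singleton_sublist.mp h.sublist
  · intro h; obtain ⟨u, v, huv⟩ := List.mem_iff_append.mp h
    exact ⟨u, v, by simp [huv]⟩

theorem prefix_singleton_head {c : Char} {t : List Char} : [c] <+: t ↔ t.head? = some c := by
  cases t <;> simp [List.prefix_cons_iff, eq_comm]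

theorem prefix_singleton_drop {c : Char} {l : List Char} {i : Nat} :
    [c] <+: l.drop i ↔ l[i]? = some c := by
  rw [prefix_singleton_head, List.head?_drop]

theorem find_eq_of_first (s : String) (c : Char) (k : Nat)
    (hk : s.toList[k]? = some c) (hmin : ∀ i, i < k → s.toList[i]? ≠ some c) :
    PySem.Str.find s (String.singleton c) = (k : Int) := by
  have hmem : c ∈ s.toList := by
    obtain ⟨h, he⟩ := List.getElem?_eq_some_iff.mp hk
    exact he ▸ List.getElem_mem h
  have hnn : 0 ≤ PySem.Chars.find s.toList [c] := by
    rw [PySem.Chars.find_nonneg_iff]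
    exact infix_singleton_mem.mpr hmem
  obtain ⟨h1, h2⟩ := PySem.Chars.find_spec (s := s.toList) (sub := [c]) hnn
  have hj1 : s.toList[(PySem.Chars.find s.toList [c]).toNat]? = some c :=
    prefix_singleton_drop.mp h1
  have hle : ¬ ((PySem.Chars.find s.toList [c]).toNat < k) := fun h => hmin _ h hj1
  have hge : ¬ (k < (PySem.Chars.find s.toList [c]).toNat) := fun h =>
    h2 k h (prefix_singleton_drop.mpr hk)
  have heq : (PySem.Chars.find s.toList [c]).toNat = k := by omega
  have : PySem.Str.find s (String.singleton c) = PySem.Chars.find s.toList [c] := by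
    simp
  rw [this, ← heq, Int.toNat_of_nonneg hnn]

theorem vA_of_not_mem (s : String) (c : Char) (h : c ∉ s.toList) :
    vA s (String.singleton c) = String.singleton c := by
  have hf : PySem.Str.find s (String.singleton c) = -1 := by
    rw [PySem.Str.find_eq_neg_one_iff, singleton_toList]
    exact fun hin => h (infix_singleton_mem.mp hin)
  unfold vA
  simp only [hf]
  simp

-- ===== A-side =====

theorem foldA_eq (s : String) (l : List Int) (m : PySem.Dict String String) :
    l.foldl (fun m i =>
      let c := PySem.Int.toStr i
      let j := PySem.Str.find s c
      if j ≠ -1 then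
        if j < PySem.Str.len s - 1 then
          m.insert c (((PySem.Str.pyGet? s (PySem.Str.find s c + 1)).map (fun ch => String.singleton ch)).getD "")
        else
          m.insert c (((PySem.Str.pyGet? s 0).map (fun ch => String.singleton ch)).getD "")
      else
        m.insert c c) m
    = l.foldl (fun m i => m.insert (PySem.Int.toStr i) (vA s (PySem.Int.toStr i))) m := by
  induction l generalizing m with
  | nil => rfl
  | cons i t ih =>
      simp only [List.foldl_cons]
      have hstep :
          (let c := PySem.Int.toStr i
           let j := PySem.Str.find s c
           if j ≠ -1 then
             if j < PySem.Str.len s - 1 then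
               m.insert c (((PySem.Str.pyGet? s (PySem.Str.find s c + 1)).map (fun ch => String.singleton ch)).getD "")
             else
               m.insert c (((PySem.Str.pyGet? s 0).map (fun ch => String.singleton ch)).getD "")
           else
             m.insert c c)
          = m.insert (PySem.Int.toStr i) (vA s (PySem.Int.toStr i)) := by
        show (if PySem.Str.find s (PySem.Int.toStr i) ≠ -1 then
                if PySem.Str.find s (PySem.Int.toStr i) < PySem.Str.len s - 1 then
                  m.insert (PySem.Int.toStr i) (((PySem.Str.pyGet? s (PySem.Str.find s (PySem.Int.toStr i) + 1)).map (fun ch => String.singleton ch)).getD "")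
                else
                  m.insert (PySem.Int.toStr i) (((PySem.Str.pyGet? s 0).map (fun ch => String.singleton ch)).getD "")
              else
                m.insert (PySem.Int.toStr i) (PySem.Int.toStr i))
            = m.insert (PySem.Int.toStr i) (vA s (PySem.Int.toStr i))
        unfold vA
        split_ifs <;> rfl
      rw [hstep]
      exact ih _

theorem make_perm_eq_map (s : String) :
    make_perm s = digitChars.map (fun c => (String.singleton c, vA s (String.singleton c))) := by
  unfold make_perm
  rw [foldA_eq]
  rw [PySem.Dict.items_foldl_insert_fresh _ _ _ _ (fun a _ => rfl)
    (by decide)]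
  rfl

-- ===== B-side =====

theorem contains_mk_map (L : List Char) (g : Char → String) (ch : Char) :
    (PySem.Dict.mk (L.map (fun c => (String.singleton c, g c)))).contains (String.singleton ch)
      = decide (ch ∈ L) := by
  induction L with
  | nil => rfl
  | cons a t ih =>
      simp only [List.map_cons, PySem.Dict.contains, List.any_cons, singleton_beq]
      have ih' : (List.map (fun c => (String.singleton c, g c)) t).any
          (fun p => p.1 == String.singleton ch) = decide (ch ∈ t) := ih
      rw [ih']
      by_cases h : a = ch
      · subst h; simp
      · have h' : ¬ ch = a := fun e => h e.symm
        simp [h, h']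

theorem insert_mk_map (L : List Char) (g : Char → String) (ch : Char) (hch : ch ∈ L)
    (v : String) :
    (PySem.Dict.mk (L.map (fun c => (String.singleton c, g c)))).insert (String.singleton ch) v
      = PySem.Dict.mk (L.map (fun c => (String.singleton c, if c = ch then v else g c))) := by
  unfold PySem.Dict.insert
  rw [contains_mk_map]
  simp only [hch, decide_true, if_true]
  congr 1
  rw [List.map_map]
  refine List.map_congr_left (fun c _ => ?_)
  by_cases h : c = ch
  · subst h; simp [singleton_beq]
  · have hb : (String.singleton c == String.singleton ch) = false := by
      rw [singleton_beq]; simp [h]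
    simp [h]
    intro he
    exact absurd (singleton_inj he) h

theorem set_contains_add (s : PySem.Set String) (x y : String) :
    PySem.Set.contains (PySem.Set.add s x) y = (PySem.Set.contains s y || y == x) := by
  unfold PySem.Set.add
  split_ifs with h
  · by_cases hyx : y = x
    · subst hyx
      have h' : y ∈ s := by simpa [PySem.Set.contains] using h
      simp [PySem.Set.contains, h']
    · have hb : (y == x) = false := beq_eq_false_iff_ne.mpr hyx
      rw [hb, Bool.or_false]
  · show (s ++ [x]).contains y = (s.contains y || y == x)
    apply Bool.eq_iff_iff.mpr
    simp

theorem foldB_eq (s : String) (t : List Char) : ∀ (k : Nat)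
    (g : Char → String) (seen : PySem.Set String),
    s.toList.drop k = t →
    (∀ c : Char, PySem.Set.contains seen (String.singleton c)
        = (decide (c ∈ digitChars) && decide (c ∈ s.toList.take k))) →
    (∀ c, c ∈ digitChars →
        g c = if c ∈ s.toList.take k then vA s (String.singleton c) else String.singleton c) →
    ((PySem.List.enumerate t (k : Int)).foldl
        (fun (st : PySem.Dict String String × PySem.Set String) p =>
          let ch := String.singleton p.2
          if st.1.contains ch && !(PySem.Set.contains st.2 ch) then
            (st.1.insert ch (if p.1 < PySem.Str.len s - 1
                then ((PySem.Str.pyGet? s (p.1 + 1)).map (fun c => String.singleton c)).getD ""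
                else ((PySem.Str.pyGet? s 0).map (fun c => String.singleton c)).getD ""),
             PySem.Set.add st.2 ch)
          else st)
        (PySem.Dict.mk (digitChars.map (fun c => (String.singleton c, g c))), seen)).1.items
      = digitChars.map (fun c => (String.singleton c,
          if c ∈ s.toList then vA s (String.singleton c) else String.singleton c)) := by
  induction t with
  | nil =>
      intro k g seen ht hseen hg
      have hlen : s.toList.length ≤ k := by
        have := congrArg List.length ht
        simp only [List.length_drop, List.length_nil] at this
        omega
      have htake : s.toList.take k = s.toList := List.take_of_length_le hlen
      simp only [PySem.List.enumerate_nil, List.foldl_nil]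
      refine List.map_congr_left (fun c hc => ?_)
      rw [hg c hc, htake]
  | cons ch t ih =>
      intro k g seen ht hseen hg
      have hk : s.toList[k]? = some ch := by
        rw [← List.head?_drop, ht]; rfl
      have hklt : k < s.toList.length := List.getElem?_eq_some_iff.mp hk |>.1
      have hdrop : s.toList.drop (k + 1) = t := by
        rw [← List.tail_drop, ht]; rfl
      have htake : s.toList.take (k + 1) = s.toList.take k ++ [ch] := by
        rw [List.take_add_one, hk]; rfl
      rw [PySem.List.enumerate_cons, List.foldl_cons]
      simp only [contains_mk_map, hseen ch]
      by_cases hdig : ch ∈ digitChars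
      · by_cases hseenk : ch ∈ s.toList.take k
        · -- already seen: no update
          simp only [hdig, hseenk, decide_true, Bool.and_self, Bool.not_true, Bool.and_false]
          refine ih (k + 1) g seen hdrop (fun c => ?_) (fun c hc => ?_)
          · rw [hseen c]
            by_cases hceq : c = ch
            · subst hceq; simp [hseenk, htake]
            · simp [htake, hceq]
          · rw [hg c hc]
            by_cases hceq : c = ch
            · subst hceq; simp [hseenk, htake]
            · simp [htake, hceq]
        · -- first occurrence of a digit
          simp only [hdig, hseenk, decide_true, decide_false, Bool.and_false, Bool.not_false,
            Bool.and_true, if_true]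
          have hfind : PySem.Str.find s (String.singleton ch) = (k : Int) := by
            refine find_eq_of_first s ch k hk (fun i hi hcontra => ?_)
            obtain ⟨hilt, hieq⟩ := List.getElem?_eq_some_iff.mp hcontra
            have hlt' : i < (s.toList.take k).length := by
              simp only [List.length_take]
              omega
            have hgt : (s.toList.take k)[i]'hlt' = ch := by
              rw [List.getElem_take]
              exact hieq
            exact absurd (hgt ▸ List.getElem_mem hlt') hseenk
          have hne : ¬ ((k : Int) = -1) := by omega
          have hval : (if (k : Int) < PySem.Str.len s - 1
                then ((PySem.Str.pyGet? s ((k : Int) + 1)).map (fun c => String.singleton c)).getD ""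
                else ((PySem.Str.pyGet? s 0).map (fun c => String.singleton c)).getD "")
              = vA s (String.singleton ch) := by
            unfold vA
            rw [hfind, if_pos hne]
          rw [insert_mk_map digitChars g ch hdig]
          refine ih (k + 1) _ _ hdrop (fun c => ?_) (fun c hc => ?_)
          · rw [set_contains_add, hseen c, singleton_beq]
            by_cases hceq : c = ch
            · subst hceq
              have hb : (c == c) = true := by simp
              simp [htake, hdig]
            · have hb : (c == ch) = false := beq_eq_false_iff_ne.mpr hceq
              simp [htake, hceq, hb]
          · by_cases hceq : c = ch
            · subst hceq
              have hmem' : c ∈ s.toList.take (k + 1) := by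
                rw [htake]
                exact List.mem_append_right _ (List.mem_singleton_self c)
              rw [if_pos rfl, if_pos hmem']
              exact hval
            · have hmem' : (c ∈ s.toList.take (k + 1)) ↔ (c ∈ s.toList.take k) := by
                rw [htake]; simp [hceq]
              rw [if_neg hceq, hg c hc]
              by_cases hm : c ∈ s.toList.take k
              · rw [if_pos hm, if_pos (hmem'.mpr hm)]
              · rw [if_neg hm, if_neg (fun hx => hm (hmem'.mp hx))]
      · -- not a digit: no update
        simp only [hdig, decide_false, Bool.false_and]
        refine ih (k + 1) g seen hdrop (fun c => ?_) (fun c hc => ?_)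
        · rw [hseen c]
          by_cases hceq : c = ch
          · subst hceq; simp [hdig]
          · simp [htake, hceq]
        · rw [hg c hc]
          by_cases hceq : c = ch
          · subst hceq; simp [hdig] at hc ⊢
          · simp [htake, hceq]

theorem make_perm_alt_eq_map (s : String) :
    make_perm_alt s = digitChars.map (fun c =>
      (String.singleton c,
        if c ∈ s.toList then vA s (String.singleton c) else String.singleton c)) := by
  unfold make_perm_alt
  have hm0 : ((PySem.List.pyRange 1 (8 + 1) 1).map PySem.Int.toStr).foldl
      (fun d c => d.insert c c) PySem.Dict.empty
      = PySem.Dict.mk (digitChars.map (fun c => (String.singleton c, String.singleton c))) := by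
    rfl
  simp only [hm0]
  have h0 : ((0 : Int)) = ((0 : Nat) : Int) := rfl
  rw [h0]
  exact foldB_eq s s.toList 0 String.singleton PySem.Set.empty (by simp)
    (fun c => by simp [PySem.Set.contains, PySem.Set.empty])
    (fun c _ => by simp)

-- ===== VERDICT (by name: the statement is the Claim_ definition above) =====
theorem make_perm_spec : Claim_equal_make_perm := by
  intro s _
  unfold Spec_make_perm
  rw [make_perm_eq_map, make_perm_alt_eq_map]
  refine List.map_congr_left (fun c _ => ?_)
  by_cases h : c ∈ s.toList
  · simp [h]
  · simp [h, vA_of_not_mem s c h]
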